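-- pv_equiv track=rewrite | github.com/prasadnaik-null/codeforces | 1547B.py | yea
-- ===== SOURCE A (Python) =====
-- def yea(s, n):
--     try:
--         m = s.index(chr(n+97))
--         if len(s) == 3:
--             return "YES"
--         else:
--             if s[m-1] == chr(n+98) or s[m+1] == chr(n+98):
--                 s = s[:m]+s[m+1:]
--                 return yea(s, n+1)
--             else:
--                 return "NO"
--     except:
--         return "NO"
-- ===== SOURCE B (Python) =====
-- def yea(s, n):
--     # Iterative version: mutate a char list in place instead of recursing on string slices.
--     t = list(s)
--     try:
--         while True:
--             m = t.index(chr(n + 97))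
--             if len(t) == 3:
--                 return "YES"
--             if t[m - 1] == chr(n + 98) or t[m + 1] == chr(n + 98):
--                 del t[m]
--                 n += 1
--             else:
--                 return "NO"
--     except:
--         return "NO"
-- ===== Notes on version B (the rewrite author's own statement) =====
-- stated objective: alternative
-- what changed: Replaced A's tail recursion that rebuilds the string by slicing (s[:m]+s[m+1:]) at every step with an iterative while loop that mutates a char list in place (del t[m]) under a single try/except.
import Mathlib
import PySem

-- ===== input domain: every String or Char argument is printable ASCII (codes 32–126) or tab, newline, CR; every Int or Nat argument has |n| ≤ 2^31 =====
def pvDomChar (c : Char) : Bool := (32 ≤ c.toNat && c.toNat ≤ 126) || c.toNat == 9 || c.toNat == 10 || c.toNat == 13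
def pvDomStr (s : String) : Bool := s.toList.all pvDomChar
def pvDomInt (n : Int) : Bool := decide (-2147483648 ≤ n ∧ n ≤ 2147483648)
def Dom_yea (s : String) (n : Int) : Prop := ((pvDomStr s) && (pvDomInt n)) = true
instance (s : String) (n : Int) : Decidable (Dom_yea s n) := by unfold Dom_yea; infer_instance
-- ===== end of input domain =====

-- B replaces A's tail recursion over string slices by an iterative in-place deletion loop over a
-- char list with one surrounding try/except; return values are proved equal on all inputs.
-- Both ports represent characters by their Unicode code points (Nat), which makes chr()/char
-- comparison exact, including code points Lean's Char would reject (surrogates).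

-- ===== PORT A =====
-- chr(n+97) raises ValueError outside [0, 0x10FFFF]; the blanket except turns every raise into "NO".
def yeaCore (l : List Nat) (n : Int) : String :=
  if n + 97 < 0 ∨ (0x10FFFF : Int) < n + 97 then "NO"   -- chr(n+97) raises → except → "NO"
  else
    match _h : PySem.List.index? l (n + 97).toNat with
    | none => "NO"                                       -- s.index raises ValueError → "NO"
    | some m =>
      if l.length = 3 then "YES"
      else if (0x10FFFF : Int) < n + 98 then "NO"        -- chr(n+98) raises → "NO"
      else
        match PySem.List.pyGet? l ((m : Int) - 1) with
        | none => "NO"                                   -- IndexError → "NO" (unreachable: l ≠ [])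
        | some left =>
          if left = (n + 98).toNat then
            yeaCore (l.take m ++ l.drop (m + 1)) (n + 1) -- s[:m]+s[m+1:]
          else
            match PySem.List.pyGet? l ((m : Int) + 1) with
            | none => "NO"                               -- IndexError → "NO"
            | some right =>
              if right = (n + 98).toNat then
                yeaCore (l.take m ++ l.drop (m + 1)) (n + 1)
              else "NO"
termination_by l.length
decreasing_by
  all_goals
    obtain ⟨hk, -, -⟩ := PySem.List.getElem_of_index?_eq_some _h
    simp [List.length_append, List.length_take, List.length_drop]
    omega

def yea (s : String) (n : Int) : String := yeaCore (s.toList.map Char.toNat) n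

-- ===== PORT B =====
-- chr(i): some code point, or none where Python's chr raises (caught by the loop's except).
def chrB? (i : Int) : Option Nat :=
  if 0 ≤ i ∧ i ≤ 0x10FFFF then some i.toNat else none

-- The try-block body in the Option monad: `none` is a raised exception escaping the while
-- loop, `some r` a `return r` from inside it; each iteration of the while loop is one
-- recursive call (the loop only re-enters after `del t[m]; n += 1`).
def yeaAltLoop (t : List Nat) (n : Int) : Option String :=
  (chrB? (n + 97)).bind fun c =>
    match _h : PySem.List.index? t c with
    | none => none                                       -- t.index raises ValueError
    | some m =>
      if t.length = 3 then some "YES"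
      else
        (chrB? (n + 98)).bind fun nb =>
          (PySem.List.pyGet? t ((m : Int) - 1)).bind fun left =>
            if left = nb then yeaAltLoop (t.eraseIdx m) (n + 1)   -- del t[m]; next iteration
            else
              (PySem.List.pyGet? t ((m : Int) + 1)).bind fun right =>
                if right = nb then yeaAltLoop (t.eraseIdx m) (n + 1)
                else some "NO"
termination_by t.length
decreasing_by
  all_goals
    obtain ⟨hk, -, -⟩ := PySem.List.getElem_of_index?_eq_some _h
    rw [List.length_eraseIdx_of_lt hk]
    omega

-- the surrounding `except: return "NO"`
def yea_alt (s : String) (n : Int) : String :=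
  (yeaAltLoop (s.toList.map Char.toNat) n).getD "NO"

-- ===== PRECONDITION & SPEC =====
def Spec_yea (s : String) (n : Int) (out : String) : Prop := out = yea_alt s n
instance (s : String) (n : Int) (out : String) : Decidable (Spec_yea s n out) := by unfold Spec_yea; infer_instance

-- ===== CLAIM (what is proved, stated in full; the proofs are below) =====
def Claim_equal_yea : Prop := ∀ (s : String) (n : Int), Dom_yea s n → Spec_yea s n (yea s n)

-- ===== LEMMAS AND PROOFS =====

theorem core_eq : ∀ (len : Nat) (l : List Nat) (n : Int), l.length = len →
    yeaCore l n = (yeaAltLoop l n).getD "NO" := by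
  intro len
  induction len using Nat.strong_induction_on with
  | _ len ih =>
  intro l n hlen
  rw [yeaCore, yeaAltLoop]
  by_cases h1 : n + 97 < 0 ∨ (0x10FFFF : Int) < n + 97
  · rw [if_pos h1, show chrB? (n + 97) = none from by unfold chrB?; rw [if_neg (by omega)]]
    rfl
  · rw [if_neg h1,
      show chrB? (n + 97) = some (n + 97).toNat from by unfold chrB?; rw [if_pos (by omega)],
      Option.bind_some]
    -- the shared s.index / t.index computation
    split
    · rfl
    · next m hs =>
      obtain ⟨hk, -, -⟩ := PySem.List.getElem_of_index?_eq_some hs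
      by_cases h3 : l.length = 3
      · rw [if_pos h3, if_pos h3]; rfl
      · rw [if_neg h3, if_neg h3]
        by_cases h4 : (0x10FFFF : Int) < n + 98
        · rw [if_pos h4,
            show chrB? (n + 98) = none from by unfold chrB?; rw [if_neg (by omega)]]
          rfl
        · rw [if_neg h4,
            show chrB? (n + 98) = some (n + 98).toNat from by
              unfold chrB?; rw [if_pos (by omega)],
            Option.bind_some]
          have hrec := ih (len - 1) (by omega) (l.eraseIdx m) (n + 1)
            (by rw [List.length_eraseIdx_of_lt hk]; omega)
          conv at hrec => lhs; rw [List.eraseIdx_eq_take_drop_succ]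
          -- the shared s[m-1] / t[m-1] access
          split
          · next hn => rw [hn]; rfl
          · next left hl =>
            rw [hl]
            rw [Option.bind_some]
            by_cases hp : left = (n + 98).toNat
            · rw [if_pos hp, if_pos hp, hrec]
            · rw [if_neg hp, if_neg hp]
              -- the shared s[m+1] / t[m+1] access
              split
              · next hn => rw [hn]; rfl
              · next right hr =>
                rw [hr, Option.bind_some]
                by_cases h5 : right = (n + 98).toNat
                · rw [if_pos h5, if_pos h5, hrec]
                · rw [if_neg h5, if_neg h5]; rfl

-- ===== VERDICT (by name: the statement is the Claim_ definition above) =====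
theorem yea_spec : Claim_equal_yea := by
  intro s n _
  unfold Spec_yea yea yea_alt
  exact core_eq _ _ _ rfl
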